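-- pv_equiv track=rewrite | github.com/netchron-personal/official-unofficial-junos-upgrade-script | upgrader.py | get_full_version
-- ===== SOURCE A (Python) =====
-- def get_full_version(version, versionlist):
--     """Get the full version from the version list."""
--     matching_versions = [v for v in versionlist if v.startswith(version)]
--     if matching_versions:
--         return matching_versions[-1]
--     else:
--         lower_versions = [v for v in versionlist if v < version]
--         if lower_versions:
--             return lower_versions[-1]
--         else:
--             return None
-- ===== SOURCE B (Python) =====
-- def get_full_version(version, versionlist):
--     """Get the full version from the version list."""
--     lower = None
--     have_lower = False
--     for v in reversed(versionlist):
--         if v.startswith(version):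
--             return v
--         if not have_lower and v < version:
--             lower = v
--             have_lower = True
--     return lower
-- ===== Notes on version B (the rewrite author's own statement) =====
-- stated objective: alternative
-- what changed: Replaces the two full filter passes and intermediate lists with a single backward scan that returns the first prefix match from the end immediately and remembers the first lower version from the end as fallback.
import Mathlib
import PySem

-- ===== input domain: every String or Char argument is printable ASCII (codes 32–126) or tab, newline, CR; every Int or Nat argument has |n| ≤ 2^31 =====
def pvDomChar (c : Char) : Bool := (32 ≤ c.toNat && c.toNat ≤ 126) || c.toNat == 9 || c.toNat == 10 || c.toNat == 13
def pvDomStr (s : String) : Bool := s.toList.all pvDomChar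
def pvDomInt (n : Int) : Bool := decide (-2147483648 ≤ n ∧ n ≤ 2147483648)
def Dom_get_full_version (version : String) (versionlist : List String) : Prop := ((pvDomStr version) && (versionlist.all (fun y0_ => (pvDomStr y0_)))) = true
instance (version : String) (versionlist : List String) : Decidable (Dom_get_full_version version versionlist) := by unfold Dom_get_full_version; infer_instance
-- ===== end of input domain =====

-- B replaces A's two filter passes (and intermediate lists) by one backward scan with an
-- early return on the first prefix match from the end and a remembered first-lower fallback.

-- ===== PORT A =====
def get_full_version (version : String) (versionlist : List String) : Option String :=
  let matching_versions := versionlist.filter (fun v => PySem.Str.startswith v version)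
  if matching_versions ≠ [] then
    PySem.List.pyGet? matching_versions (-1)
  else
    let lower_versions := versionlist.filter (fun v => decide (v < version))
    if lower_versions ≠ [] then
      PySem.List.pyGet? lower_versions (-1)
    else
      none

-- ===== PORT B =====
-- the 'for v in reversed(versionlist)' loop, carrying the remembered lower version
def gfvLoop (version : String) (lower : Option String) : List String → Option String
  | [] => lower
  | v :: rest =>
    if PySem.Str.startswith v version then some v
    else gfvLoop version (if lower.isNone && decide (v < version) then some v else lower) rest

def get_full_version_alt (version : String) (versionlist : List String) : Option String :=
  gfvLoop version none versionlist.reverse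

-- ===== PRECONDITION & SPEC =====
def Spec_get_full_version (version : String) (versionlist : List String) (out : Option String) : Prop := out = get_full_version_alt version versionlist
instance (version : String) (versionlist : List String) (out : Option String) : Decidable (Spec_get_full_version version versionlist out) := by unfold Spec_get_full_version; infer_instance

-- ===== CLAIM (what is proved, stated in full; the proofs are below) =====
def Claim_equal_get_full_version : Prop := ∀ (version : String) (versionlist : List String), Dom_get_full_version version versionlist → Spec_get_full_version version versionlist (get_full_version version versionlist)

-- ===== LEMMAS AND PROOFS =====

theorem gfvLoop_eq (version : String) :
    ∀ (l : List String) (lower : Option String),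
      gfvLoop version lower l =
        ((l.filter (fun v => PySem.Str.startswith v version)).head?).or
          (if lower.isSome then lower else (l.filter (fun v => decide (v < version))).head?) := by
  intro l
  induction l with
  | nil => intro lower; cases lower <;> simp [gfvLoop]
  | cons v rest ih =>
    intro lower
    by_cases hsw : PySem.Chars.startswith v.toList version.toList = true
    · simp [gfvLoop, hsw]
    · cases lower with
      | some x => simp [gfvLoop, hsw, ih]
      | none =>
        by_cases hlt : v.toList < version.toList
        · simp [gfvLoop, hsw, hlt, ih]
        · simp [gfvLoop, hsw, hlt, ih]

theorem get_full_version_spec : Claim_equal_get_full_version := by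
  intro version versionlist _
  unfold Spec_get_full_version get_full_version get_full_version_alt
  rw [gfvLoop_eq]
  simp only [Option.isSome_none, Bool.false_eq_true, if_false,
    List.filter_reverse, List.head?_reverse]
  split_ifs with hm hl
  · rw [PySem.List.pyGet?_neg_one]
    cases h : (versionlist.filter (fun v => PySem.Str.startswith v version)).getLast? with
    | none => exact absurd (List.getLast?_eq_none_iff.mp h) hm
    | some x => rfl
  · rw [not_not] at hm
    rw [hm, PySem.List.pyGet?_neg_one]
    simp only [List.getLast?_nil, Option.none_or]
  · rw [not_not] at hm hl
    rw [hm, hl]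
    simp only [List.getLast?_nil, Option.none_or]
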